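-- pv_equiv track=rewrite | github.com/eerytea/d20-fight-club | engine/spells.py | line_aoe_cells
-- ===== SOURCE A (Python) =====
-- from typing import Iterable, List, Tuple
--
-- def line_aoe_cells(sx: int, sy: int, tx: int, ty: int, length: int, cols: int, rows: int) -> List[Tuple[int,int]]:
--     length = max(1, int(length))
--     dx = tx - sx
--     dy = ty - sy
--     # choose cardinal axis by dominant delta; break ties preferring X
--     if abs(dx) >= abs(dy):
--         step_x = 1 if dx > 0 else -1 if dx < 0 else 0
--         step_y = 0
--     else:
--         step_x = 0
--         step_y = 1 if dy > 0 else -1 if dy < 0 else 0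
--     out: List[Tuple[int,int]] = []
--     cx, cy = sx, sy
--     for _ in range(length):
--         cx += step_x; cy += step_y
--         if 0 <= cx < cols and 0 <= cy < rows:
--             out.append((cx, cy))
--         else:
--             break
--     return out
-- ===== SOURCE B (Python) =====
-- def line_aoe_cells(sx, sy, tx, ty, length, cols, rows):
--     length = max(1, int(length))
--     dx = tx - sx
--     dy = ty - sy
--     if abs(dx) >= abs(dy):
--         step_x = (dx > 0) - (dx < 0)
--         step_y = 0
--     else:
--         step_x = 0
--         step_y = (dy > 0) - (dy < 0)
--     def axis_interval(c, step, dim):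
--         # integer interval of step-indices i with 0 <= c + i*step < dim
--         if step == 0:
--             return (1, length) if 0 <= c < dim else (1, 0)
--         if step == 1:
--             return (-c, dim - 1 - c)
--         return (c - dim + 1, c)
--     lox, hix = axis_interval(sx, step_x, cols)
--     loy, hiy = axis_interval(sy, step_y, rows)
--     lo = max(1, lox, loy)
--     hi = min(length, hix, hiy)
--     if lo > 1:
--         return []
--     return [(sx + i * step_x, sy + i * step_y) for i in range(1, hi + 1)]
-- ===== Notes on version B (the rewrite author's own statement) =====
-- stated objective: alternative
-- what changed: Replaces A's step-by-step walk with a break by closed-form interval arithmetic: per axis it computes the integer interval of step-indices that stay in bounds, intersects the intervals, caps to [1, length], and emits the cells directly from that range.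
import Mathlib
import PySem

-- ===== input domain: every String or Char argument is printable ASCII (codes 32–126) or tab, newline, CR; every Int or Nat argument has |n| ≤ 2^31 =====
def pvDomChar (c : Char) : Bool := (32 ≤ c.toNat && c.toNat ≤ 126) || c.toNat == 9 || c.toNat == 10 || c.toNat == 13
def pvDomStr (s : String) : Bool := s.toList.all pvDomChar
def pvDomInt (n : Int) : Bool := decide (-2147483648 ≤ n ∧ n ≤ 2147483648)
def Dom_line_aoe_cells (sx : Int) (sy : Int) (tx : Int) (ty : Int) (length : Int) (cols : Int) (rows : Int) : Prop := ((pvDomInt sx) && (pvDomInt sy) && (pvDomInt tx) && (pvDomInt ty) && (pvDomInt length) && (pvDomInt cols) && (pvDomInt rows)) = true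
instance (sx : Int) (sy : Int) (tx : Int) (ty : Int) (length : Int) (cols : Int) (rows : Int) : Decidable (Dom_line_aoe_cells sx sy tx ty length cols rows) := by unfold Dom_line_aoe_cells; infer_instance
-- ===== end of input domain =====

-- B replaces A's step-by-step walk-and-break loop by interval arithmetic: it computes, per axis,
-- the integer interval of step-indices that stay in bounds, intersects, and emits the range directly
-- (objective: alternative decomposition; same asymptotic cost).

-- ===== PORT A =====
-- A's for-loop with break: walks one step at a time, appending while in bounds.
def pvALoop (step_x step_y cols rows : Int) : Nat → Int → Int → List (Int × Int)
  | 0, _, _ => []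
  | Nat.succ n, cx, cy =>
      let cx' := cx + step_x
      let cy' := cy + step_y
      if 0 ≤ cx' ∧ cx' < cols ∧ 0 ≤ cy' ∧ cy' < rows then
        (cx', cy') :: pvALoop step_x step_y cols rows n cx' cy'
      else []

-- the dominant-delta step selection (step_x, step_y), A's if-elif-else chain
def pvStepA (dx dy : Int) : Int × Int :=
  if |dx| ≥ |dy| then
    ((if dx > 0 then 1 else if dx < 0 then -1 else 0), 0)
  else
    (0, (if dy > 0 then 1 else if dy < 0 then -1 else 0))

def line_aoe_cells (sx : Int) (sy : Int) (tx : Int) (ty : Int) (length : Int) (cols : Int) (rows : Int) : List (Int × Int) :=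
  let len := max 1 length
  let st := pvStepA (tx - sx) (ty - sy)
  pvALoop st.1 st.2 cols rows len.toNat sx sy

-- ===== PORT B =====
-- Source B's step selection, written with sign arithmetic (dx > 0) - (dx < 0)
def pvStepB (dx dy : Int) : Int × Int :=
  if |dx| ≥ |dy| then
    (((if dx > 0 then (1:Int) else 0) - (if dx < 0 then 1 else 0)), 0)
  else
    (0, ((if dy > 0 then (1:Int) else 0) - (if dy < 0 then 1 else 0)))

-- Source B's axis_interval helper: the integer interval of step-indices i with 0 <= c + i*step < dim
def pvAxisInterval (len c step dim : Int) : Int × Int :=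
  if step = 0 then (if 0 ≤ c ∧ c < dim then (1, len) else (1, 0))
  else if step = 1 then (-c, dim - 1 - c)
  else (c - dim + 1, c)

def line_aoe_cells_alt (sx : Int) (sy : Int) (tx : Int) (ty : Int) (length : Int) (cols : Int) (rows : Int) : List (Int × Int) :=
  let len := max 1 length
  let st := pvStepB (tx - sx) (ty - sy)
  let ix := pvAxisInterval len sx st.1 cols
  let iy := pvAxisInterval len sy st.2 rows
  let lo := max 1 (max ix.1 iy.1)
  let hi := min len (min ix.2 iy.2)
  if lo > 1 then []
  else (PySem.List.pyRange 1 (hi + 1) 1).map (fun i => (sx + i * st.1, sy + i * st.2))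

-- ===== PRECONDITION & SPEC =====
def Spec_line_aoe_cells (sx : Int) (sy : Int) (tx : Int) (ty : Int) (length : Int) (cols : Int) (rows : Int) (out : List (Int × Int)) : Prop := out = line_aoe_cells_alt sx sy tx ty length cols rows
instance (sx : Int) (sy : Int) (tx : Int) (ty : Int) (length : Int) (cols : Int) (rows : Int) (out : List (Int × Int)) : Decidable (Spec_line_aoe_cells sx sy tx ty length cols rows out) := by unfold Spec_line_aoe_cells; infer_instance

-- ===== CLAIM (what is proved, stated in full; the proofs are below) =====
def Claim_equal_line_aoe_cells : Prop := ∀ (sx : Int) (sy : Int) (tx : Int) (ty : Int) (length : Int) (cols : Int) (rows : Int), Dom_line_aoe_cells sx sy tx ty length cols rows → Spec_line_aoe_cells sx sy tx ty length cols rows (line_aoe_cells sx sy tx ty length cols rows)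

-- ===== LEMMAS AND PROOFS =====

-- integer range [a, b) as a list (proof helper)
def pvIntRange (a b : Int) : List Int :=
  (List.range (b - a).toNat).map (fun k : Nat => a + (k : Int))

theorem pvIntRange_cons (a b : Int) (h : a < b) :
    pvIntRange a b = a :: pvIntRange (a + 1) b := by
  unfold pvIntRange
  have h1 : (b - a).toNat = (b - (a + 1)).toNat + 1 := by omega
  rw [h1, List.range_succ_eq_map, List.map_cons, List.map_map]
  refine congrArg₂ _ (by norm_num) (List.map_congr_left ?_)
  intro k _
  simp only [Function.comp]
  push_cast
  ring

theorem pvIntRange_nil (a b : Int) (h : b ≤ a) : pvIntRange a b = [] := by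
  unfold pvIntRange
  have : (b - a).toNat = 0 := by omega
  simp [this]

-- Characterisation of A's loop when the in-bounds predicate is, on the visited window, the interval [lo, hi].
theorem pvALoop_eq (step_x step_y cols rows sx sy lo hi : Int) :
    ∀ (n : Nat) (j : Int),
      (∀ i : Int, j + 1 ≤ i → i ≤ j + n →
        ((0 ≤ sx + i * step_x ∧ sx + i * step_x < cols ∧ 0 ≤ sy + i * step_y ∧ sy + i * step_y < rows)
          ↔ (lo ≤ i ∧ i ≤ hi))) →
      pvALoop step_x step_y cols rows n (sx + j * step_x) (sy + j * step_y) =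
        if lo ≤ j + 1 then
          (pvIntRange (j + 1) (min (j + n) hi + 1)).map (fun i => (sx + i * step_x, sy + i * step_y))
        else [] := by
  intro n
  induction n with
  | zero =>
      intro j _
      have hnil : min (j + ((0:Nat):Int)) hi + 1 ≤ j + 1 := by omega
      simp only [pvALoop, pvIntRange_nil _ _ hnil, List.map_nil, ite_self]
  | succ n ih =>
      intro j h
      have hcell : sx + j * step_x + step_x = sx + (j + 1) * step_x := by ring
      have hcell' : sy + j * step_y + step_y = sy + (j + 1) * step_y := by ring
      have hcast : ((n + 1 : Nat) : Int) = (n : Int) + 1 := by push_cast; ring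
      have hj1 := h (j + 1) (le_refl _) (by omega)
      by_cases hc : 0 ≤ sx + (j+1) * step_x ∧ sx + (j+1) * step_x < cols ∧ 0 ≤ sy + (j+1) * step_y ∧ sy + (j+1) * step_y < rows
      · have hlohi : lo ≤ j + 1 ∧ j + 1 ≤ hi := hj1.mp hc
        have hrec := ih (j + 1) (by
          intro i h1 h2
          exact h i (by omega) (by omega))
        rw [show pvALoop step_x step_y cols rows (n+1) (sx + j * step_x) (sy + j * step_y) =
              (sx + (j+1) * step_x, sy + (j+1) * step_y) ::
                pvALoop step_x step_y cols rows n (sx + (j+1) * step_x) (sy + (j+1) * step_y) by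
          simp only [pvALoop, hcell, hcell']
          rw [if_pos hc]]
        rw [hrec, if_pos (by omega), if_pos hlohi.1]
        have hlt : j + 1 < min (j + ((n+1:Nat):Int)) hi + 1 := by
          rw [hcast]; omega
        rw [pvIntRange_cons _ _ hlt, List.map_cons]
        have hmin : min (j + ((n+1:Nat):Int)) hi = min (j + 1 + ((n:Nat):Int)) hi := by
          rw [hcast]; ring_nf
        rw [hmin]
      · rw [show pvALoop step_x step_y cols rows (n+1) (sx + j * step_x) (sy + j * step_y) = [] by
          simp only [pvALoop, hcell, hcell']
          rw [if_neg hc]]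
        by_cases hlo : lo ≤ j + 1
        · have hhi : hi < j + 1 := by omega
          have hnil : min (j + ((n+1:Nat):Int)) hi + 1 ≤ j + 1 := by omega
          rw [if_pos hlo, pvIntRange_nil _ _ hnil, List.map_nil]
        · rw [if_neg hlo]

theorem pvStep_eq (dx dy : Int) : pvStepA dx dy = pvStepB dx dy := by
  unfold pvStepA pvStepB
  split_ifs <;> norm_num <;> omega

theorem pvStepB_1_mem (dx dy : Int) :
    (pvStepB dx dy).1 = -1 ∨ (pvStepB dx dy).1 = 0 ∨ (pvStepB dx dy).1 = 1 := by
  unfold pvStepB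
  split_ifs <;> simp

theorem pvStepB_2_mem (dx dy : Int) :
    (pvStepB dx dy).2 = -1 ∨ (pvStepB dx dy).2 = 0 ∨ (pvStepB dx dy).2 = 1 := by
  unfold pvStepB
  split_ifs <;> simp

-- on 1 ≤ i ≤ len, staying in bounds on one axis is exactly membership in Source B's axis interval
theorem pvAxis_iff (len c step dim i : Int) (hs : step = -1 ∨ step = 0 ∨ step = 1)
    (h1 : 1 ≤ i) (h2 : i ≤ len) :
    (0 ≤ c + i * step ∧ c + i * step < dim) ↔
      ((pvAxisInterval len c step dim).1 ≤ i ∧ i ≤ (pvAxisInterval len c step dim).2) := by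
  rcases hs with h | h | h <;> subst h <;> simp only [pvAxisInterval] <;> split_ifs <;> first | omega | (exfalso; omega)

-- ===== VERDICT (by name: the statement is the Claim_ definition above) =====
theorem line_aoe_cells_spec : Claim_equal_line_aoe_cells := by
  intro sx sy tx ty length cols rows _
  unfold Spec_line_aoe_cells line_aoe_cells line_aoe_cells_alt
  rw [pvStep_eq]
  have hstx := pvStepB_1_mem (tx - sx) (ty - sy)
  have hsty := pvStepB_2_mem (tx - sx) (ty - sy)
  generalize hst : pvStepB (tx - sx) (ty - sy) = st at *
  obtain ⟨stx, sty⟩ := st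
  simp only [] at *
  set len : Int := max 1 length with hlen
  have hlen1 : 1 ≤ len := le_max_left 1 length
  have hcast : ((len.toNat : Int)) = len := by omega
  set ix := pvAxisInterval len sx stx cols with hix
  set iy := pvAxisInterval len sy sty rows with hiy
  have hIff : ∀ i : Int, (0:Int) + 1 ≤ i → i ≤ 0 + (len.toNat : Int) →
      ((0 ≤ sx + i * stx ∧ sx + i * stx < cols ∧ 0 ≤ sy + i * sty ∧ sy + i * sty < rows)
        ↔ (max ix.1 iy.1 ≤ i ∧ i ≤ min ix.2 iy.2)) := by
    intro i h1 h2
    have h1' : 1 ≤ i := by omega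
    have h2' : i ≤ len := by omega
    have HX := pvAxis_iff len sx stx cols i hstx h1' h2'
    have HY := pvAxis_iff len sy sty rows i hsty h1' h2'
    rw [← hix] at HX
    rw [← hiy] at HY
    constructor
    · rintro ⟨a, b, c, d⟩
      have p := HX.mp ⟨a, b⟩
      have q := HY.mp ⟨c, d⟩
      omega
    · rintro ⟨p, q⟩
      obtain ⟨a, b⟩ := HX.mpr ⟨by omega, by omega⟩
      obtain ⟨c, d⟩ := HY.mpr ⟨by omega, by omega⟩
      exact ⟨a, b, c, d⟩
  have hA := pvALoop_eq stx sty cols rows sx sy (max ix.1 iy.1) (min ix.2 iy.2) len.toNat 0 hIff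
  simp only [zero_mul, add_zero, zero_add, hcast] at hA
  rw [hA]
  by_cases hlo : max ix.1 iy.1 ≤ 1
  · rw [if_pos hlo, if_neg (by omega)]
    rw [PySem.List.pyRange_one]
    rfl
  · rw [if_neg hlo, if_pos (by omega)]
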